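-- pv_equiv track=rewrite | github.com/thkoch2001/tvlfyi_depot | users/wpcarro/scratch/facebook/language.py | ast
-- ===== SOURCE A (Python) =====
-- def ast(tokens):
--     result = []
--     series = []
--     for token in tokens:
--         if token == '+':
--             result.append(series)
--             series = []
--         elif token == '*':
--             continue
--         else:
--             series.append(token)
--     if series:
--         result.append(series)
--     return result
-- ===== SOURCE B (Python) =====
-- def ast(tokens):
--     ts = [t for t in tokens if t != '*']
--     result = []
--     while '+' in ts:
--         i = ts.index('+')
--         result.append(ts[:i])
--         ts = ts[i + 1:]
--     if ts:
--         result.append(ts)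
--     return result
-- ===== Notes on version B (the rewrite author's own statement) =====
-- stated objective: alternative
-- what changed: B filters out '*' in one pass and then repeatedly locates the next '+' with list.index and slices off a whole group at a time, instead of A's per-token accumulator loop maintaining a current series.
import Mathlib
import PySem

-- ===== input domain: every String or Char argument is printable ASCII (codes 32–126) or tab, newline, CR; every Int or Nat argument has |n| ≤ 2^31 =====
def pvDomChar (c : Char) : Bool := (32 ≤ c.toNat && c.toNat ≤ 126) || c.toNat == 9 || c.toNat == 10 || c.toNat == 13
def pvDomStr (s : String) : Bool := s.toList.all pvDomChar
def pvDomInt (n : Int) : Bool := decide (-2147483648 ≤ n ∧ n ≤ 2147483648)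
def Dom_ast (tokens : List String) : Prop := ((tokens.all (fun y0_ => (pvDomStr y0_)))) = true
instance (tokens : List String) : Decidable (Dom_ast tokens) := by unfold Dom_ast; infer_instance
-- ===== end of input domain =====

-- B rewrites A's per-token accumulator loop as: drop '*' once, then repeatedly find the
-- next '+' and slice off a whole group (alternative decomposition, not claimed faster).

-- ===== PORT A =====
-- the body of A's for-loop as a fold step over the state (result, series)
def astStep (acc : List (List String) × List String) (token : String) :
    List (List String) × List String :=
  if token = "+" then (acc.1 ++ [acc.2], [])
  else if token = "*" then acc
  else (acc.1, acc.2 ++ [token])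

def ast (tokens : List String) : List (List String) :=
  let st := tokens.foldl astStep ([], [])
  if st.2 = [] then st.1 else st.1 ++ [st.2]

-- ===== PORT B =====
-- the while-loop of Source B: `'+' in ts` and `ts.index('+')` are the one scan PySem.List.index?
-- (none ↔ '+' not in ts); ts[:i] / ts[i+1:] with the nonnegative index i are
-- take i / drop (i+1), exact by PySem.List.slice_natCast / slice_from_natCast.
def astAltLoop (ts : List String) (result : List (List String)) : List (List String) :=
  match h : PySem.List.index? ts "+" with
  | none => if ts = [] then result else result ++ [ts]
  | some i => astAltLoop (ts.drop (i + 1)) (result ++ [ts.take i])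
termination_by ts.length
decreasing_by
  have ⟨hk, _, _⟩ := PySem.List.getElem_of_index?_eq_some h
  simp only [List.length_drop]; omega

def ast_alt (tokens : List String) : List (List String) :=
  astAltLoop (tokens.filter (fun t => t != "*")) []

-- ===== PRECONDITION & SPEC =====
def Spec_ast (tokens : List String) (out : List (List String)) : Prop := out = ast_alt tokens
instance (tokens : List String) (out : List (List String)) : Decidable (Spec_ast tokens out) := by unfold Spec_ast; infer_instance

-- ===== CLAIM (what is proved, stated in full; the proofs are below) =====
def Claim_equal_ast : Prop := ∀ (tokens : List String), Dom_ast tokens → Spec_ast tokens (ast tokens)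

-- ===== LEMMAS AND PROOFS =====

-- equation lemmas for astAltLoop
theorem astAltLoop_none (ts : List String) (res : List (List String))
    (h : PySem.List.index? ts "+" = none) :
    astAltLoop ts res = if ts = [] then res else res ++ [ts] := by
  rw [astAltLoop]
  split
  · rfl
  · rename_i heq; rw [h] at heq; simp at heq

theorem astAltLoop_some (ts : List String) (res : List (List String)) (i : Nat)
    (h : PySem.List.index? ts "+" = some i) :
    astAltLoop ts res = astAltLoop (ts.drop (i + 1)) (res ++ [ts.take i]) := by
  rw [astAltLoop]
  split
  · rename_i heq; rw [h] at heq; simp at heq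
  · rename_i j heq; rw [h] at heq; injection heq with hj; subst hj; rfl

-- the accumulator only ever receives appended groups
theorem astAltLoop_append (ts : List String) (res : List (List String)) :
    astAltLoop ts res = res ++ astAltLoop ts [] := by
  match h : PySem.List.index? ts "+" with
  | none =>
    rw [astAltLoop_none _ _ h, astAltLoop_none _ _ h]
    split <;> simp
  | some i =>
    rw [astAltLoop_some _ _ _ h, astAltLoop_some _ _ _ h,
        astAltLoop_append (ts.drop (i + 1)) (res ++ [ts.take i]),
        astAltLoop_append (ts.drop (i + 1)) ([] ++ [ts.take i])]
    simp
termination_by ts.length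
decreasing_by
  all_goals
    have ⟨hk, _, _⟩ := PySem.List.getElem_of_index?_eq_some h
    simp only [List.length_drop]; omega

-- how B's loop treats one leading token: '+' closes an (empty) group …
theorem astAltLoop_plus (ts : List String) :
    astAltLoop ("+" :: ts) [] = [] :: astAltLoop ts [] := by
  rw [astAltLoop_some ("+" :: ts) [] 0 (PySem.List.index?_cons_self _ _)]
  simp only [List.drop_succ_cons, List.drop_zero, List.take_zero, List.nil_append]
  rw [astAltLoop_append ts [[]]]
  rfl

-- prepend a token to the first group (the effect of a non-separator token on B's result)
def consHead (t : String) (gs : List (List String)) : List (List String) :=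
  match gs with
  | [] => [[t]]
  | g :: gs => (t :: g) :: gs

-- … and any other token lands at the front of the first group
theorem astAltLoop_cons (t : String) (ts : List String) (ht : t ≠ "+") :
    astAltLoop (t :: ts) [] = consHead t (astAltLoop ts []) := by
  match h : PySem.List.index? ts "+" with
  | none =>
    have h' : PySem.List.index? (t :: ts) "+" = none := by
      rw [PySem.List.index?_cons_of_ne ts ht, h]; rfl
    rw [astAltLoop_none _ _ h', astAltLoop_none _ _ h]
    cases ts <;> simp [consHead]
  | some j =>
    have h' : PySem.List.index? (t :: ts) "+" = some (j + 1) := by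
      rw [PySem.List.index?_cons_of_ne ts ht, h]; rfl
    rw [astAltLoop_some _ _ _ h', astAltLoop_some _ _ _ h,
        astAltLoop_append ((t :: ts).drop (j + 1 + 1)),
        astAltLoop_append (ts.drop (j + 1))]
    simp [consHead, List.take_succ_cons]

-- merge a pending series into B's groups (the effect of A's open accumulator)
def glue (s : List String) (gs : List (List String)) : List (List String) :=
  match gs with
  | [] => if s = [] then [] else [s]
  | g :: gs => (s ++ g) :: gs

theorem glue_nil (gs : List (List String)) : glue [] gs = gs := by
  cases gs <;> simp [glue]

theorem glue_snoc (s : List String) (t : String) (gs : List (List String)) :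
    glue (s ++ [t]) gs = glue s (consHead t gs) := by
  cases gs <;> simp [glue, consHead]

-- A's fold ignores '*', so it equals the fold over the '*'-filtered list
theorem foldl_astStep_filter (ts : List String) (st : List (List String) × List String) :
    ts.foldl astStep st = (ts.filter (fun t => t != "*")).foldl astStep st := by
  induction ts generalizing st with
  | nil => rfl
  | cons t ts ih =>
    by_cases h : t = "*"
    · subst h
      have hid : astStep st "*" = st := by
        simp [astStep]
      simp only [List.filter_cons, List.foldl_cons, hid]
      simpa using ih st
    · have hb : (t != "*") = true := by simpa using h
      simp only [List.filter_cons, hb, if_pos, List.foldl_cons]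
      exact ih _

-- invariant: finishing A's fold state equals B's groups, glued to the open series
theorem foldl_astStep_glue (ts : List String) (hstar : "*" ∉ ts) :
    ∀ (r : List (List String)) (s : List String),
      (if (ts.foldl astStep (r, s)).2 = [] then (ts.foldl astStep (r, s)).1
       else (ts.foldl astStep (r, s)).1 ++ [(ts.foldl astStep (r, s)).2])
        = r ++ glue s (astAltLoop ts []) := by
  induction ts with
  | nil =>
    intro r s
    rw [astAltLoop_none [] [] (by rw [PySem.List.index?_eq_idxOf?]; rfl)]
    by_cases hs : s = [] <;> simp [glue, hs]
  | cons t ts ih =>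
    intro r s
    have hstar' : "*" ∉ ts := fun hm => hstar (List.mem_cons_of_mem _ hm)
    have htstar : t ≠ "*" := fun he => hstar (he ▸ List.mem_cons_self)
    by_cases ht : t = "+"
    · subst ht
      have hstep : astStep (r, s) "+" = (r ++ [s], []) := by simp [astStep]
      rw [List.foldl_cons, hstep, ih hstar' (r ++ [s]) [], astAltLoop_plus, glue_nil]
      simp [glue]
    · have hstep : astStep (r, s) t = (r, s ++ [t]) := by simp [astStep, ht, htstar]
      rw [List.foldl_cons, hstep, ih hstar' r (s ++ [t]), astAltLoop_cons t ts ht, glue_snoc]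

-- ===== VERDICT (by name: the statement is the Claim_ definition above) =====
theorem ast_spec : Claim_equal_ast := by
  intro tokens _
  unfold Spec_ast ast ast_alt
  have hstar : "*" ∉ tokens.filter (fun t => t != "*") := by
    intro hm
    simpa using (List.mem_filter.mp hm).2
  have h2 := foldl_astStep_glue (tokens.filter (fun t => t != "*")) hstar [] []
  rw [glue_nil, List.nil_append] at h2
  show (if ((tokens.foldl astStep ([], []))).2 = [] then (tokens.foldl astStep ([], [])).1
       else (tokens.foldl astStep ([], [])).1 ++ [(tokens.foldl astStep ([], [])).2])
      = astAltLoop (tokens.filter (fun t => t != "*")) []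
  rw [foldl_astStep_filter]
  exact h2
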